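-- pv_equiv track=rewrite | github.com/FORTH-ICS-INSPIRE/artemis | other/bgpstreamhist/bgpstream_records_to_yaml.py | __clean_loops
-- ===== SOURCE A (Python) =====
-- def __clean_loops(seq):
--     # use inverse direction to clean loops in the path of the traffic
--     seq_inv = seq[::-1]
--     new_seq_inv = []
--     for x in seq_inv:
--         if x not in new_seq_inv:
--             new_seq_inv.append(x)
--         else:
--             x_index = new_seq_inv.index(x)
--             new_seq_inv = new_seq_inv[:x_index+1]
--     return new_seq_inv[::-1]
-- ===== SOURCE B (Python) =====
-- def __clean_loops(seq):
--     # Different algorithm: no incremental stack truncation. Precompute each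
--     # value's LAST occurrence index in the reversed path (one dict-comprehension
--     # pass), then build the result by greedy jumps: emit r[i] and jump straight
--     # past its last occurrence. This is exact because in A, every element pushed
--     # between an occurrence of x and x's final recurrence is eventually cut away,
--     # so only the jump skeleton survives. O(n) instead of O(n^2).
--     r = seq[::-1]
--     last = {x: i for i, x in enumerate(r)}
--     out = []
--     i = 0
--     while i < len(r):
--         x = r[i]
--         out.append(x)
--         i = last[x] + 1
--     return out[::-1]
-- ===== Notes on version B (the rewrite author's own statement) =====
-- stated objective: faster
-- what changed: Replaces the incremental stack-with-truncation scan by a two-phase jump construction: one pass builds a value-to-last-occurrence-index dict over the reversed path, then the result is produced by greedy jumps (emit r[i], jump to last[r[i]]+1), with no membership scan, index search or truncation at all.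
import Mathlib
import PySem

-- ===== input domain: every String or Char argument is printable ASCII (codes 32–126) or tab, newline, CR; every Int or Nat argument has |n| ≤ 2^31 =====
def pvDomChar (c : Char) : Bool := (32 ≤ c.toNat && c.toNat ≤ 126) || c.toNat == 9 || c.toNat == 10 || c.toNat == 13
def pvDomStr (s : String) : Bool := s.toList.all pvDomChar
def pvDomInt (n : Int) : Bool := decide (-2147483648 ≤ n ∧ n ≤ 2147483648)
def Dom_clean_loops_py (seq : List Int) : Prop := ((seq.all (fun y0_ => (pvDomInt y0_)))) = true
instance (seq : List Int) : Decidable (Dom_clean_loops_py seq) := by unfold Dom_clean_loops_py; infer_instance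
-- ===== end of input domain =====

-- B replaces A's incremental stack-truncation scan by a two-phase construction:
-- one pass records each value's last occurrence index in the reversed path, then
-- the result is built by greedy jumps past each emitted value's last occurrence.

-- ===== PORT A =====
-- loop body of A: 'if x not in new_seq_inv: append; else: truncate at index+1'
def pvStepA (acc : List Int) (x : Int) : List Int :=
  if x ∉ acc then acc ++ [x]
  else
    match PySem.List.index? acc x with          -- new_seq_inv.index(x)
    | some i => PySem.List.slice acc none (some ((i : Int) + 1))   -- new_seq_inv[:x_index+1]
    | none => acc                               -- unreachable: guarded by x ∈ acc

def clean_loops_py (seq : List Int) : List Int :=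
  let seq_inv := seq.reverse                    -- seq[::-1]
  let new_seq_inv := seq_inv.foldl pvStepA []
  new_seq_inv.reverse                           -- new_seq_inv[::-1]

-- ===== PORT B =====
-- last = {x: i for i, x in enumerate(r)}
def pvLastDict (r : List Int) : PySem.Dict Int Int :=
  (PySem.List.enumerate r).foldl (fun d p => d.insert p.2 p.1) PySem.Dict.empty

-- the while loop 'while i < len(r): x = r[i]; out.append(x); i = last[x] + 1',
-- with fuel; both 'none' branches are unreachable (0 ≤ i < len r, and x = r[i]
-- is always a key of last — Python would raise KeyError otherwise)
def pvLoopB (r : List Int) (last : PySem.Dict Int Int) : Nat → Int → List Int → List Int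
  | 0, _, out => out
  | fuel+1, i, out =>
    if i < (r.length : Int) then
      match PySem.List.pyGet? r i with
      | some x =>
          match last.get? x with
          | some j => pvLoopB r last fuel (j + 1) (out ++ [x])
          | none => out
      | none => out
    else out

def clean_loops_py_alt (seq : List Int) : List Int :=
  let r := seq.reverse                          -- seq[::-1]
  (pvLoopB r (pvLastDict r) (r.length + 1) 0 []).reverse   -- out[::-1]

-- ===== PRECONDITION & SPEC =====
def Spec_clean_loops_py (seq : List Int) (out : List Int) : Prop := out = clean_loops_py_alt seq
instance (seq : List Int) (out : List Int) : Decidable (Spec_clean_loops_py seq out) := by unfold Spec_clean_loops_py; infer_instance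

-- ===== CLAIM (what is proved, stated in full; the proofs are below) =====
def Claim_equal_clean_loops_py : Prop := ∀ (seq : List Int), Dom_clean_loops_py seq → Spec_clean_loops_py seq (clean_loops_py seq)

-- ===== LEMMAS AND PROOFS =====

-- common specification: emit the head, then continue after its last occurrence
def pvJump : List Int → List Int
  | [] => []
  | x :: xs => x :: pvJump ((xs.reverse.takeWhile (fun y => y != x)).reverse)
termination_by l => l.length
decreasing_by
  have h := (List.takeWhile_sublist (p := fun y => y != x) (l := xs.reverse)).length_le
  simp at h ⊢
  omega

theorem pvJump_nil : pvJump [] = [] := by rw [pvJump]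

theorem pvJump_cons (x : Int) (xs : List Int) :
    pvJump (x :: xs) = x :: pvJump ((xs.reverse.takeWhile (fun y => y != x)).reverse) := by
  rw [pvJump]

theorem pv_takeWhile_append_all {p : Int → Bool} (a b : List Int)
    (h : ∀ y ∈ a, p y = true) : (a ++ b).takeWhile p = a ++ b.takeWhile p := by
  induction a with
  | nil => rfl
  | cons y a ih =>
    rw [List.cons_append, List.takeWhile_cons_of_pos (h y (by simp)),
        ih (fun z hz => h z (by simp [hz])), List.cons_append]

theorem pv_takeWhile_all {p : Int → Bool} (a : List Int)
    (h : ∀ y ∈ a, p y = true) : a.takeWhile p = a := by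
  have := pv_takeWhile_append_all a [] h
  simpa using this

-- suffix after the last occurrence, as B's jump sees it vs A's takeWhile form
theorem pv_suffix_not_mem (l : List Int) (x : Int) (h : x ∉ l) :
    ((l.reverse.takeWhile (fun y => y != x)).reverse) = l := by
  rw [pv_takeWhile_all]
  · simp
  · intro y hy
    simp only [bne_iff_ne, ne_eq]
    intro he; exact h (he ▸ (List.mem_reverse.mp hy))

theorem pv_suffix_mem (l : List Int) (x : Int) (m : Nat) (hm : m < l.length)
    (hx : l[m] = x) (hnot : x ∉ l.drop (m+1)) :
    ((l.reverse.takeWhile (fun y => y != x)).reverse) = l.drop (m+1) := by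
  have hsplit : l = l.take (m+1) ++ l.drop (m+1) := (List.take_append_drop _ _).symm
  have htk : l.take (m+1) = l.take m ++ [x] := by
    rw [List.take_add_one]
    simp [List.getElem?_eq_getElem hm, hx]
  have hrev : l.reverse = (l.drop (m+1)).reverse ++ (x :: (l.take m).reverse) := by
    conv_lhs => rw [hsplit]
    rw [List.reverse_append, htk, List.reverse_append]
    simp
  rw [hrev, pv_takeWhile_append_all]
  · rw [List.takeWhile_cons_of_neg (by simp)]
    simp
  · intro y hy
    simp only [bne_iff_ne, ne_eq]
    intro he; exact hnot (he ▸ (List.mem_reverse.mp hy))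

-- ---- A-side: the foldl equals pvJump ----

theorem pvStepA_head (t : List Int) (x y : Int) : ∃ s, pvStepA (x :: t) y = x :: s := by
  unfold pvStepA
  by_cases hmem : y ∈ x :: t
  · rw [if_neg (not_not_intro hmem)]
    obtain ⟨k, hk⟩ := Option.isSome_iff_exists.mp ((PySem.List.index?_isSome_iff _ _).2 hmem)
    rw [hk]
    dsimp only
    have : ((k : Int) + 1) = ((k + 1 : Nat) : Int) := by push_cast; ring
    rw [this, PySem.List.slice_to_natCast]
    exact ⟨t.take k, by simp⟩
  · rw [if_pos hmem]
    exact ⟨t ++ [y], by simp⟩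

theorem pv_foldl_head (l : List Int) (t : List Int) (x : Int) :
    ∃ t', List.foldl pvStepA (x :: t) l = x :: t' := by
  induction l generalizing t with
  | nil => exact ⟨t, rfl⟩
  | cons y l ih =>
    obtain ⟨s, hs⟩ := pvStepA_head t x y
    simp only [List.foldl_cons, hs]
    exact ih s

theorem pv_foldl_lift (l : List Int) (x : Int) (t : List Int)
    (hl : x ∉ l) (ht : x ∉ t) :
    List.foldl pvStepA (x :: t) l = x :: List.foldl pvStepA t l := by
  induction l generalizing t with
  | nil => rfl
  | cons y l ih =>
    have hyx : y ≠ x := fun he => hl (by simp [he])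
    have hstep : pvStepA (x :: t) y = x :: pvStepA t y ∧ x ∉ pvStepA t y := by
      unfold pvStepA
      by_cases hmem : y ∈ t
      · have hmem' : y ∈ x :: t := by simp [hmem]
        rw [if_neg (not_not_intro hmem), if_neg (not_not_intro hmem')]
        obtain ⟨k, hk⟩ := Option.isSome_iff_exists.mp ((PySem.List.index?_isSome_iff _ _).2 hmem)
        rw [hk, PySem.List.index?_cons_of_ne _ (Ne.symm hyx), hk]
        simp only [Option.map_some]
        have h1 : ((k : Int) + 1) = ((k + 1 : Nat) : Int) := by push_cast; ring
        have h2 : ((k + 1 : Nat) : Int) + 1 = ((k + 2 : Nat) : Int) := by push_cast; ring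
        rw [h1, h2, PySem.List.slice_to_natCast, PySem.List.slice_to_natCast]
        constructor
        · simp [List.take_succ_cons]
        · exact fun hc => ht (List.mem_of_mem_take hc)
      · have hmem' : y ∉ x :: t := by simp [hyx, hmem]
        rw [if_pos hmem, if_pos hmem']
        exact ⟨by simp, by simp [ht, Ne.symm hyx]⟩
    simp only [List.foldl_cons, hstep.1]
    exact ih (pvStepA t y) (fun hc => hl (by simp [hc])) hstep.2

theorem pv_dropWhile_mem (l : List Int) (x : Int) (h : x ∈ l) :
    ∃ c, l.dropWhile (fun y => y != x) = x :: c := by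
  induction l with
  | nil => simp at h
  | cons y l ih =>
    by_cases hyx : y = x
    · subst hyx
      exact ⟨l, by rw [List.dropWhile_cons_of_neg (by simp)]⟩
    · have : x ∈ l := by rcases List.mem_cons.mp h with h | h; exact absurd h.symm hyx; exact h
      obtain ⟨c, hc⟩ := ih this
      exact ⟨c, by rw [List.dropWhile_cons_of_pos (by simp [hyx]), hc]⟩

theorem pv_foldl_eq_pvJump (n : Nat) : ∀ (r : List Int), r.length ≤ n →
    List.foldl pvStepA [] r = pvJump r := by
  induction n with
  | zero =>
    intro r hr
    rw [List.length_eq_zero_iff.mp (Nat.le_zero.mp hr), pvJump_nil]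
    rfl
  | succ n ih =>
    intro r hr
    match r with
    | [] => rw [pvJump_nil]; rfl
    | x :: xs =>
      have hxs : xs.length ≤ n := by simpa using hr
      have hstart : pvStepA [] x = [x] := by simp [pvStepA]
      rw [List.foldl_cons, hstart, pvJump_cons]
      by_cases hx : x ∈ xs
      · -- split xs.reverse at the FIRST occurrence of x (= last occurrence in xs)
        set a := xs.reverse.takeWhile (fun y => y != x) with ha
        obtain ⟨c, hc⟩ := pv_dropWhile_mem xs.reverse x (by simpa using hx)
        have hdecomp : xs.reverse = a ++ x :: c := by
          rw [ha, ← hc]; exact (List.takeWhile_append_dropWhile).symm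
        have hxa : x ∉ a := by
          intro hmem
          have := List.mem_takeWhile_imp hmem
          simp at this
        have hxs_eq : xs = c.reverse ++ x :: a.reverse := by
          have := congrArg List.reverse hdecomp
          simpa using this
        rw [hxs_eq, List.foldl_append]
        obtain ⟨t', ht'⟩ := pv_foldl_head c.reverse [] x
        rw [ht', List.foldl_cons]
        have hcut : pvStepA (x :: t') x = [x] := by
          unfold pvStepA
          rw [if_neg (not_not_intro (by simp)), PySem.List.index?_cons_self]
          dsimp only
          have : ((0 : Nat) : Int) + 1 = ((1 : Nat) : Int) := by norm_num
          rw [this, PySem.List.slice_to_natCast]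
          simp
        rw [hcut, pv_foldl_lift a.reverse x [] (by simpa using hxa) (by simp)]
        have hlen : a.reverse.length ≤ n := by
          have h1 : a.length ≤ xs.length := by
            rw [ha]
            simpa using (List.takeWhile_sublist (p := fun y => y != x) (l := xs.reverse)).length_le
          simpa using le_trans h1 hxs
        rw [ih a.reverse hlen]
      · rw [pv_foldl_lift xs x [] hx (by simp), ih xs hxs,
            pv_suffix_not_mem xs x hx]

-- ---- B-side: the last-occurrence dict and the jump loop ----

theorem pv_lastDict_append (l : List Int) (y : Int) :
    pvLastDict (l ++ [y]) = (pvLastDict l).insert y (l.length : Int) := by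
  unfold pvLastDict
  rw [PySem.List.enumerate_append, List.foldl_append]
  simp

theorem pv_lastDict_spec (r : List Int) (x : Int) :
    (x ∉ r → (pvLastDict r).get? x = none) ∧
    (x ∈ r → ∃ j : Nat, (pvLastDict r).get? x = some (j : Int) ∧
        ∃ h : j < r.length, r[j] = x ∧ x ∉ r.drop (j+1)) := by
  induction r using List.reverseRecOn with
  | nil =>
    refine ⟨fun _ => ?_, fun h => absurd h (List.not_mem_nil)⟩
    simp [pvLastDict, PySem.List.enumerate]
  | append_singleton l y ih =>
    rw [pv_lastDict_append]
    by_cases hxy : x = y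
    · subst hxy
      refine ⟨fun h => absurd (by simp) h, fun _ => ?_⟩
      refine ⟨l.length, PySem.Dict.get?_insert_self _ _ _, by simp, by simp, by simp⟩
    · rw [PySem.Dict.get?_insert_of_ne _ _ hxy]
      constructor
      · intro h
        exact ih.1 (fun hc => h (by simp [hc]))
      · intro h
        have hxl : x ∈ l := by
          rcases List.mem_append.mp h with h | h
          · exact h
          · exact absurd (List.mem_singleton.mp h) hxy
        obtain ⟨j, hj, hlt, hget, hnot⟩ := ih.2 hxl
        refine ⟨j, hj, by simp; omega, ?_, ?_⟩
        · rw [List.getElem_append_left hlt]; exact hget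
        · rw [List.drop_append_of_le_length (by omega)]
          simp [hnot, hxy]

theorem pv_loopB_eq (r : List Int) (fuel : Nat) : ∀ (i : Nat) (out : List Int),
    r.length - i < fuel →
    pvLoopB r (pvLastDict r) fuel (i : Int) out = out ++ pvJump (r.drop i) := by
  induction fuel with
  | zero => intro i out h; omega
  | succ fuel ih =>
    intro i out h
    by_cases hi : i < r.length
    · have hii : (i : Int) < (r.length : Int) := by exact_mod_cast hi
      rw [pvLoopB, if_pos hii]
      have hget : PySem.List.pyGet? r (i : Int) = some r[i] := by
        rw [PySem.List.pyGet?_natCast, List.getElem?_eq_getElem hi]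
      rw [hget]
      dsimp only
      set x := r[i] with hx
      obtain ⟨j, hj, hjlt, hjget, hjnot⟩ := (pv_lastDict_spec r x).2 (List.getElem_mem hi)
      rw [hj]
      dsimp only
      have hij : i ≤ j := by
        by_contra hc
        have hc' : j + 1 ≤ i := by omega
        have h1 : (r.drop (j+1))[i - (j+1)]'(by simp only [List.length_drop]; omega) ∈ r.drop (j+1) :=
          List.getElem_mem _
        rw [List.getElem_drop] at h1
        have h2 : (j+1) + (i - (j+1)) = i := by omega
        simp only [h2] at h1
        rw [← hx] at h1
        exact hjnot h1
      have hstep : (j : Int) + 1 = ((j + 1 : Nat) : Int) := by push_cast; ring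
      rw [hstep, ih (j+1) (out ++ [x]) (by omega)]
      have hdropi : r.drop i = x :: r.drop (i+1) := by
        rw [List.drop_eq_getElem_cons hi]
      have hsuf : ((r.drop (i+1)).reverse.takeWhile (fun y => y != x)).reverse = r.drop (j+1) := by
        rcases Nat.eq_or_lt_of_le hij with heq | hlt
        · subst heq
          exact pv_suffix_not_mem _ _ hjnot
        · have hm : j - (i+1) < (r.drop (i+1)).length := by
            simp only [List.length_drop]; omega
          have hgm : (r.drop (i+1))[j - (i+1)]'hm = x := by
            rw [List.getElem_drop]
            have h2 : (i+1) + (j - (i+1)) = j := by omega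
            simp only [h2]; exact hjget
          have hdd : (r.drop (i+1)).drop ((j - (i+1)) + 1) = r.drop (j+1) := by
            rw [List.drop_drop]
            congr 1
            omega
          rw [pv_suffix_mem _ _ _ hm hgm (hdd ▸ hjnot), hdd]
      rw [hdropi, pvJump_cons, hsuf, List.append_assoc, List.singleton_append]
    · have hii : ¬ ((i : Int) < (r.length : Int)) := by exact_mod_cast hi
      rw [pvLoopB, if_neg hii, List.drop_eq_nil_of_le (by omega)]
      simp [pvJump]

-- ===== VERDICT (by name: the statement is the Claim_ definition above) =====
theorem clean_loops_py_spec : Claim_equal_clean_loops_py := by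
  intro seq _
  show clean_loops_py seq = clean_loops_py_alt seq
  simp only [clean_loops_py, clean_loops_py_alt]
  rw [pv_foldl_eq_pvJump seq.reverse.length seq.reverse le_rfl]
  rw [show (0 : Int) = ((0 : Nat) : Int) from rfl,
      pv_loopB_eq seq.reverse (seq.reverse.length + 1) 0 [] (by omega)]
  simp
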